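-- pv_equiv track=rewrite | github.com/PhilippeNguyen/mtg_draft_bot | draftsimtools/bot_tester.py | get_rank_error
-- ===== SOURCE A (Python) =====
-- def get_rank_error(pack, pack_rank):
--     """ Checks the rank error between a bot pick and a human pick.
--
--     Returns a tuple of (cardname, rank_error) for the rank of the human's choice.
--     """
--     rank_error = 0
--     human_pick = pack[0]
--     pack_rank = sorted(pack_rank, key = pack_rank.get, reverse = True)
--     for card in pack_rank:
--         if card == human_pick:
--             break
--         rank_error += 1
--     return (pack[0], rank_error)
-- ===== SOURCE B (Python) =====
-- def get_rank_error(pack, pack_rank):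
--     """ Checks the rank error between a bot pick and a human pick.
--
--     Single pass over the dict (no sort): the human pick's rank in the
--     value-descending stable order equals the number of cards with a strictly
--     greater value plus the number of equal-value cards inserted earlier.
--     """
--     human_pick = pack[0]
--     if human_pick not in pack_rank:
--         return (human_pick, len(pack_rank))
--     v0 = pack_rank[human_pick]
--     rank_error = 0
--     seen = False
--     for card, v in pack_rank.items():
--         if card == human_pick:
--             seen = True
--         elif v > v0 or (not seen and v == v0):
--             rank_error += 1
--     return (human_pick, rank_error)
-- ===== Notes on version B (the rewrite author's own statement) =====
-- stated objective: alternative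
-- what changed: B drops A's value-descending sort of the whole dict and instead makes a single counting pass over the dict items: cards with a strictly greater value plus equal-value cards inserted before the human pick, which is exactly the pick's index in the stable descending order.
import Mathlib
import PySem

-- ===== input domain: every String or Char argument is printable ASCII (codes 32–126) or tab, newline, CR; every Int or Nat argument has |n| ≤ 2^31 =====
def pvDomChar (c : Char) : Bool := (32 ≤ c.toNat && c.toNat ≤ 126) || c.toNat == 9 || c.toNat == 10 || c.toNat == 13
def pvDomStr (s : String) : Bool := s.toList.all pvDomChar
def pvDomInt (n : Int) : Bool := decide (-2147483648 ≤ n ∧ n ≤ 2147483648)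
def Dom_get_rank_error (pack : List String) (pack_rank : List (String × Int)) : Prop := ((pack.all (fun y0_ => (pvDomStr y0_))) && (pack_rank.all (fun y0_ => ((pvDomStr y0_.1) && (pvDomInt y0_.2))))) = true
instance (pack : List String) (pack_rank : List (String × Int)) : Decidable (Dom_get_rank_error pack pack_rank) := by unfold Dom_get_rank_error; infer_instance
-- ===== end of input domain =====

-- B replaces A's sort-then-scan by a single counting pass over the dict (strictly-greater
-- values plus earlier-inserted equal values); objective: alternative — a timing run did
-- not confirm a measurable speed-up.

-- ===== PORT A =====
-- A's 'for card in pack_rank: if card == human_pick: break; rank_error += 1'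
def pvALoop (h : String) : List String → Int
  | [] => 0
  | c :: t => if c = h then 0 else 1 + pvALoop h t

def get_rank_error (pack : List String) (pack_rank : List (String × Int)) : String × Int :=
  match pack with
  | [] => ("", 0)   -- pack[0] raises IndexError here; excluded by Pre_
  | human_pick :: _ =>
    let d : PySem.Dict String Int := PySem.Dict.ofList pack_rank
    -- key=pack_rank.get: every sorted element is a key of the dict, so .get always
    -- returns the stored value; getD k 0 is exact on those inputs
    let s := PySem.List.sorted d.keys (fun k => d.getD k 0) true
    (human_pick, pvALoop human_pick s)

-- ===== PORT B =====
-- B's single pass over pack_rank.items() with the 'seen' flag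
def pvBLoop (h : String) (v0 : Int) : Bool → List (String × Int) → Int
  | _, [] => 0
  | seen, (c, v) :: t =>
    if c = h then pvBLoop h v0 true t
    else if v0 < v ∨ (seen = false ∧ v = v0) then 1 + pvBLoop h v0 seen t
    else pvBLoop h v0 seen t

def get_rank_error_alt (pack : List String) (pack_rank : List (String × Int)) : String × Int :=
  match pack with
  | [] => ("", 0)   -- pack[0] raises IndexError here; excluded by Pre_
  | human_pick :: _ =>
    let d : PySem.Dict String Int := PySem.Dict.ofList pack_rank
    match d.get? human_pick with
    | none => (human_pick, (d.size : Int))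
    | some v0 => (human_pick, pvBLoop human_pick v0 false d.items)

-- ===== PRECONDITION & SPEC =====
-- Pre_ excludes only the empty pack, on which A raises IndexError at pack[0].
def Pre_get_rank_error (pack : List String) (pack_rank : List (String × Int)) : Prop := pack ≠ []
instance (pack : List String) (pack_rank : List (String × Int)) : Decidable (Pre_get_rank_error pack pack_rank) := by unfold Pre_get_rank_error; infer_instance
def pvWitness_get_rank_error : List String × (List (String × Int)) := (["a"], [("b", 2), ("a", 1)])

def Spec_get_rank_error (pack : List String) (pack_rank : List (String × Int)) (out : String × Int) : Prop := out = get_rank_error_alt pack pack_rank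
instance (pack : List String) (pack_rank : List (String × Int)) (out : String × Int) : Decidable (Spec_get_rank_error pack pack_rank out) := by unfold Spec_get_rank_error; infer_instance

-- ===== CLAIM (what is proved, stated in full; the proofs are below) =====
def Claim_equal_get_rank_error : Prop := ∀ (pack : List String) (pack_rank : List (String × Int)), Dom_get_rank_error pack pack_rank → Pre_get_rank_error pack pack_rank → Spec_get_rank_error pack pack_rank (get_rank_error pack pack_rank)

-- ===== LEMMAS AND PROOFS =====

-- number of elements strictly before the first occurrence of h (= A's loop count)
def pvPos {α : Type} [DecidableEq α] (h : α) (s : List α) : Nat :=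
  (s.takeWhile (fun c => decide (c ≠ h))).length

theorem pvPos_cons_self {α : Type} [DecidableEq α] (h : α) (t : List α) :
    pvPos h (h :: t) = 0 := by
  simp [pvPos, List.takeWhile_cons]

theorem pvPos_cons_ne {α : Type} [DecidableEq α] {h c : α} (t : List α) (hc : c ≠ h) :
    pvPos h (c :: t) = pvPos h t + 1 := by
  simp [pvPos, List.takeWhile_cons, hc]

theorem pvALoop_eq (h : String) (s : List String) : pvALoop h s = (pvPos h s : Int) := by
  induction s with
  | nil => simp [pvALoop, pvPos]
  | cons c t ih =>
    by_cases hc : c = h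
    · subst hc; simp [pvALoop, pvPos_cons_self]
    · rw [pvPos_cons_ne t hc]; simp [pvALoop, hc, ih]; omega

theorem pvPos_not_mem {α : Type} [DecidableEq α] (h : α) (s : List α) (hm : h ∉ s) :
    pvPos h s = s.length := by
  induction s with
  | nil => rfl
  | cons c t ih =>
    simp only [List.mem_cons, not_or] at hm
    have hc : c ≠ h := fun e => hm.1 e.symm
    rw [pvPos_cons_ne t hc, ih hm.2, List.length_cons]

theorem pvCountP_split {α κ : Type} [LinearOrder κ] (key : α → κ) (a : κ) (l : List α) :
    l.countP (fun y => decide (a ≤ key y)) =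
      l.countP (fun y => decide (a < key y)) + l.countP (fun y => decide (key y = a)) := by
  induction l with
  | nil => rfl
  | cons x t ih =>
    simp only [List.countP_cons, ih]
    by_cases hlt : a < key x
    · have h2 : ¬ (key x = a) := fun e => absurd hlt (by simp [e])
      simp [le_of_lt hlt, hlt, h2]; omega
    · by_cases heq : key x = a
      · simp [le_of_eq heq.symm, hlt, heq]; omega
      · have h1 : ¬ a ≤ key x := by
          intro hle
          rcases lt_or_eq_of_le hle with c | c
          · exact hlt c
          · exact heq c.symm
        simp [h1, hlt, heq]

theorem pvInsert_self {α κ : Type} [DecidableEq α] [LinearOrder κ] (key : α → κ) (h : α)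
    (s : List α) (hm : h ∉ s) (hp : s.Pairwise (fun a b => key b ≤ key a)) :
    pvPos h (PySem.List.insertBy (fun a b => decide (key b < key a)) h s)
      = s.countP (fun y => decide (key h ≤ key y)) := by
  induction s with
  | nil => simp [PySem.List.insertBy, pvPos]
  | cons y t ih =>
    simp only [List.mem_cons, not_or] at hm
    rcases List.pairwise_cons.mp hp with ⟨hy, hp'⟩
    have hyh : y ≠ h := fun e => hm.1 e.symm
    by_cases hb : key y < key h
    · simp only [PySem.List.insertBy, hb, decide_true, if_true]
      rw [pvPos_cons_self]
      symm
      rw [List.countP_eq_zero]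
      intro x hx
      simp only [decide_eq_true_eq]
      rcases List.mem_cons.mp hx with rfl | hx
      · exact not_le_of_gt hb
      · exact fun hcon => absurd (hcon.trans (hy x hx)) (not_le_of_gt hb)
    · simp only [PySem.List.insertBy, hb, decide_false, Bool.false_eq_true, if_false]
      rw [pvPos_cons_ne _ hyh, ih hm.2 hp', List.countP_cons]
      simp [not_lt.mp hb]

theorem pvInsert_other {α κ : Type} [DecidableEq α] [LinearOrder κ] (key : α → κ) (z h : α)
    (s : List α) (hzh : z ≠ h) (hm : h ∈ s) (hp : s.Pairwise (fun a b => key b ≤ key a)) :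
    pvPos h (PySem.List.insertBy (fun a b => decide (key b < key a)) z s)
      = pvPos h s + (if key h < key z then 1 else 0) := by
  induction s with
  | nil => cases hm
  | cons y t ih =>
    rcases List.pairwise_cons.mp hp with ⟨hy, hp'⟩
    by_cases hb : key y < key z
    · simp only [PySem.List.insertBy, hb, decide_true, if_true]
      have hhz : key h < key z := by
        rcases List.mem_cons.mp hm with he | hm'
        · rw [he]; exact hb
        · exact lt_of_le_of_lt (hy h hm') hb
      rw [pvPos_cons_ne _ hzh, if_pos hhz]
    · simp only [PySem.List.insertBy, hb, decide_false, Bool.false_eq_true, if_false]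
      by_cases hyh : y = h
      · subst hyh
        rw [pvPos_cons_self, pvPos_cons_self, if_neg hb]
      · have hm' : h ∈ t := by
          rcases List.mem_cons.mp hm with he | hm'
          · exact absurd he.symm hyh
          · exact hm'
        rw [pvPos_cons_ne _ hyh, pvPos_cons_ne _ hyh, ih hm' hp']
        omega

theorem pvSorted_append_singleton {α κ : Type} [LinearOrder κ] (key : α → κ) (q : List α) (z : α) :
    PySem.List.sorted (q ++ [z]) key true
      = PySem.List.insertBy (fun a b => decide (key b < key a)) z (PySem.List.sorted q key true) := by
  rw [PySem.List.sorted_rev_eq_foldl_insertBy, PySem.List.sorted_rev_eq_foldl_insertBy,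
    List.foldl_append]
  rfl

theorem pvTakeWhile_append_cons {α : Type} [DecidableEq α] (h : α) (q t : List α) (hq : h ∉ q) :
    (q ++ h :: t).takeWhile (fun c => decide (c ≠ h)) = q := by
  induction q with
  | nil => simp [List.takeWhile_cons]
  | cons c r ih =>
    simp only [List.mem_cons, not_or] at hq
    have hdc : (decide (c ≠ h)) = true := by
      simp only [decide_eq_true_eq]
      exact fun e => hq.1 e.symm
    rw [List.cons_append, List.takeWhile_cons, if_pos hdc, ih hq.2]

theorem pvTakeWhile_append_of_mem {α : Type} [DecidableEq α] (h : α) (q t : List α) (hq : h ∈ q) :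
    (q ++ t).takeWhile (fun c => decide (c ≠ h)) = q.takeWhile (fun c => decide (c ≠ h)) := by
  induction q with
  | nil => cases hq
  | cons c r ih =>
    by_cases hc : c = h
    · have hdc : ¬ ((decide (c ≠ h)) = true) := by simp [hc]
      rw [List.cons_append, List.takeWhile_cons, if_neg hdc, List.takeWhile_cons, if_neg hdc]
    · have hr : h ∈ r := by
        rcases List.mem_cons.mp hq with he | m
        · exact absurd he.symm hc
        · exact m
      have hdc : (decide (c ≠ h)) = true := by simp [hc]
      rw [List.cons_append, List.takeWhile_cons, if_pos hdc, List.takeWhile_cons, if_pos hdc,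
        ih hr]

theorem pvSortPos {α κ : Type} [DecidableEq α] [LinearOrder κ] (key : α → κ) (p : List α)
    (hn : p.Nodup) (h : α) (hm : h ∈ p) :
    pvPos h (PySem.List.sorted p key true)
      = p.countP (fun k => decide (key h < key k))
        + (p.takeWhile (fun k => decide (k ≠ h))).countP (fun k => decide (key k = key h)) := by
  induction p using List.reverseRecOn with
  | nil => cases hm
  | append_singleton q z ih =>
    rcases List.nodup_append.mp hn with ⟨hnq, _, hdisj⟩
    rw [pvSorted_append_singleton]
    by_cases hz : h = z
    · subst hz
      have hq : h ∉ q := fun hin => (hdisj h hin h (List.mem_singleton_self h)) rfl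
      have hs : h ∉ PySem.List.sorted q key true := by
        rw [PySem.List.mem_sorted]; exact hq
      rw [pvInsert_self key h _ hs (PySem.List.sorted_pairwise_rev q key),
        (PySem.List.sorted_perm q key true).countP_eq,
        pvTakeWhile_append_cons h q [] hq, List.countP_append]
      simp only [List.countP_cons, List.countP_nil, decide_eq_true_eq, lt_irrefl, if_false]
      rw [pvCountP_split key (key h) q]
      simp
    · have hq : h ∈ q := by
        rcases List.mem_append.mp hm with m | m
        · exact m
        · exact absurd (List.mem_singleton.mp m) hz
      have hzs : z ≠ h := fun e => hz e.symm
      have hms : h ∈ PySem.List.sorted q key true := by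
        rw [PySem.List.mem_sorted]; exact hq
      rw [pvInsert_other key z h _ hzs hms (PySem.List.sorted_pairwise_rev q key),
        ih hnq hq, pvTakeWhile_append_of_mem h q [z] hq, List.countP_append]
      simp only [List.countP_cons, List.countP_nil, decide_eq_true_eq]
      split_ifs with hlt <;> omega

-- B-side loop characterisations
theorem pvBLoop_true (h : String) (v0 : Int) (l : List (String × Int))
    (hm : h ∉ l.map (fun p => p.1)) :
    pvBLoop h v0 true l = (l.countP (fun p => decide (v0 < p.2)) : Int) := by
  induction l with
  | nil => rfl
  | cons p t ih =>
    obtain ⟨c, v⟩ := p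
    simp only [List.map_cons, List.mem_cons, not_or] at hm
    have hc : ¬ c = h := fun e => hm.1 e.symm
    by_cases hv : v0 < v <;>
      simp [pvBLoop, hc, hv, List.countP_cons, ih hm.2] <;> omega

theorem pvBLoop_split (h : String) (v0 : Int) (l1 l2 : List (String × Int))
    (h1 : h ∉ l1.map (fun p => p.1)) (h2 : h ∉ l2.map (fun p => p.1)) :
    pvBLoop h v0 false (l1 ++ (h, v0) :: l2)
      = (l1.countP (fun p => decide (v0 ≤ p.2)) : Int)
        + (l2.countP (fun p => decide (v0 < p.2)) : Int) := by
  induction l1 with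
  | nil => simp [pvBLoop, pvBLoop_true h v0 l2 h2]
  | cons p t ih =>
    obtain ⟨c, v⟩ := p
    simp only [List.map_cons, List.mem_cons, not_or] at h1
    have hc : ¬ c = h := fun e => h1.1 e.symm
    have hiff : (v0 < v ∨ (false = false ∧ v = v0)) ↔ v0 ≤ v := by
      constructor
      · rintro (hlt | ⟨_, rfl⟩)
        · exact le_of_lt hlt
        · exact le_refl _
      · intro hle
        rcases lt_or_eq_of_le hle with hlt | heq
        · exact Or.inl hlt
        · exact Or.inr ⟨rfl, heq.symm⟩
    by_cases hv : v0 ≤ v <;>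
      simp [pvBLoop, hc, hiff, hv, ih h1.2] <;> omega

-- ===== VERDICT (by name: the statement is the Claim_ definition above) =====
theorem get_rank_error_spec : Claim_equal_get_rank_error := by
  intro pack pack_rank _ hpre
  unfold Spec_get_rank_error
  match pack with
  | [] => exact absurd rfl hpre
  | h :: rest =>
    simp only [get_rank_error, get_rank_error_alt]
    set d : PySem.Dict String Int := PySem.Dict.ofList pack_rank with hd
    have hnd : d.keys.Nodup := PySem.Dict.nodup_keys_ofList pack_rank
    rcases hget : d.get? h with _ | v0
    · -- human pick not in the dict: A walks the whole sorted list, B returns size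
      have hk : h ∉ d.keys := (PySem.Dict.get?_eq_none_iff_not_mem_keys d h).mp hget
      have hks : h ∉ PySem.List.sorted d.keys (fun k => d.getD k 0) true := by
        rw [PySem.List.mem_sorted]; exact hk
      simp only [pvALoop_eq, pvPos_not_mem h _ hks, PySem.List.length_sorted]
      have : d.keys.length = d.size := by simp [PySem.Dict.keys, PySem.Dict.size]
      rw [this]
    · -- human pick is a key with value v0
      simp only [hget]
      have hkv : (h, v0) ∈ d.items := PySem.Dict.mem_items_of_get?_eq_some d hget
      obtain ⟨l1, l2, hsplit⟩ := List.append_of_mem hkv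
      have hkeys : d.keys = l1.map (fun p => p.1) ++ h :: l2.map (fun p => p.1) := by
        simp [PySem.Dict.keys, hsplit]
      have hnd' : (l1.map (fun p => p.1) ++ h :: l2.map (fun p => p.1)).Nodup := hkeys ▸ hnd
      rcases List.nodup_append.mp hnd' with ⟨_, hnd2, hdisj⟩
      have h1 : h ∉ l1.map (fun p => p.1) := fun hin =>
        (hdisj h hin h List.mem_cons_self) rfl
      have h2 : h ∉ l2.map (fun p => p.1) := (List.nodup_cons.mp hnd2).1
      have hgd : ∀ p ∈ d.items, d.getD p.1 0 = p.2 := fun p hp =>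
        PySem.Dict.getD_of_mem_items d hp hnd 0
      have hgdh : d.getD h 0 = v0 := PySem.Dict.getD_of_get?_eq_some d 0 hget
      rw [pvALoop_eq,
        pvSortPos (fun k => d.getD k 0) d.keys hnd h
          (by rw [hkeys]; exact List.mem_append.mpr (Or.inr List.mem_cons_self)),
        hsplit, pvBLoop_split h v0 l1 l2 h1 h2]
      rw [hkeys, pvTakeWhile_append_cons h _ _ h1, List.countP_append]
      simp only [List.countP_cons, List.countP_map, Function.comp_def, hgdh,
        lt_self_iff_false, decide_false]
      have e1 : l1.countP (fun p => decide (v0 < d.getD p.1 0))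
          = l1.countP (fun p => decide (v0 < p.2)) := by
        apply List.countP_congr
        intro p hp
        rw [hgd p (hsplit ▸ List.mem_append.mpr (Or.inl hp))]
      have e2 : l2.countP (fun p => decide (v0 < d.getD p.1 0))
          = l2.countP (fun p => decide (v0 < p.2)) := by
        apply List.countP_congr
        intro p hp
        rw [hgd p (hsplit ▸ List.mem_append.mpr (Or.inr (List.mem_cons.mpr (Or.inr hp))))]
      have e3 : l1.countP (fun p => decide (d.getD p.1 0 = v0))
          = l1.countP (fun p => decide (p.2 = v0)) := by
        apply List.countP_congr
        intro p hp
        rw [hgd p (hsplit ▸ List.mem_append.mpr (Or.inl hp))]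
      have hsp := pvCountP_split (fun p : String × Int => p.2) v0 l1
      rw [e1, e2, e3] at *
      simp only [Prod.mk.injEq, true_and]
      push_cast
      omega
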